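-- pv_equiv track=rewrite | github.com/MMR-19/Open-ended-NER | 0. Helpers/reflection_helpers.py | get_token_context_include
-- ===== SOURCE A (Python) =====
-- import unicodedata
--
-- def char_is_punctuation(ch):
--     return unicodedata.category(ch).startswith("P")
--
-- def word_only_punctuation(text):
--     return len(text) > 0 and all(char_is_punctuation(ch) for ch in text)
--
-- def get_token_context_include(tokens, center_idx, context_length = 2):
--
--     left_tokens = []
--     left_relevant_tokens = 0
--     go_left_idx = center_idx
--
--     while go_left_idx > 0 and left_relevant_tokens < context_length:
--         potential_token = tokens[go_left_idx - 1]
--         left_tokens.append(potential_token)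
--         go_left_idx -= 1
--
--         # only count if token is relevant (ignore punctuation)
--         if not word_only_punctuation(potential_token):
--             left_relevant_tokens += 1
--
--     # invert left_tokens
--     if left_tokens:
--         left_tokens.reverse()
--
--     right_tokens = []
--     right_relevant_tokens = 0
--     go_right_idx = center_idx
--
--     while go_right_idx < len(tokens) - 1 and right_relevant_tokens < context_length:
--         potential_token = tokens[go_right_idx + 1]
--         right_tokens.append(potential_token)
--         go_right_idx += 1
--
--         # only count if token is relevant (ignore punctuation)
--         if not word_only_punctuation(potential_token):
--             right_relevant_tokens += 1
--
--     return left_tokens + [tokens[center_idx]] + right_tokens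
-- ===== SOURCE B (Python) =====
-- import unicodedata
--
--
-- def char_is_punctuation(ch):
--     return unicodedata.category(ch).startswith("P")
--
--
-- def word_only_punctuation(text):
--     return len(text) > 0 and all(char_is_punctuation(ch) for ch in text)
--
--
-- def get_token_context_include(tokens, center_idx, context_length = 2):
--     # indices of relevant (non-punctuation) tokens on each side of the center
--     left_rel = [i for i in range(center_idx) if not word_only_punctuation(tokens[i])]
--     right_rel = [i for i in range(center_idx + 1, len(tokens)) if not word_only_punctuation(tokens[i])]
--
--     if context_length <= 0:
--         start = center_idx
--     elif context_length <= len(left_rel):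
--         start = left_rel[len(left_rel) - context_length]
--     else:
--         start = 0
--
--     if context_length <= 0:
--         end = center_idx + 1
--     elif context_length <= len(right_rel):
--         end = right_rel[context_length - 1] + 1
--     else:
--         end = len(tokens)
--
--     return tokens[start:center_idx] + [tokens[center_idx]] + tokens[center_idx + 1:end]
-- ===== Notes on version B (the rewrite author's own statement) =====
-- stated objective: simpler
-- what changed: Replaces the two incremental walk-append-count-break while loops (plus a reverse) by building the list of non-punctuation token indices on each side once and taking the window as two plain slices.
-- outside the precondition, e.g. on get_token_context_include(['a', 'b'], -1, 1): A returns ['b', 'a'], B returns ['a', 'b', 'a']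
import Mathlib
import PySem

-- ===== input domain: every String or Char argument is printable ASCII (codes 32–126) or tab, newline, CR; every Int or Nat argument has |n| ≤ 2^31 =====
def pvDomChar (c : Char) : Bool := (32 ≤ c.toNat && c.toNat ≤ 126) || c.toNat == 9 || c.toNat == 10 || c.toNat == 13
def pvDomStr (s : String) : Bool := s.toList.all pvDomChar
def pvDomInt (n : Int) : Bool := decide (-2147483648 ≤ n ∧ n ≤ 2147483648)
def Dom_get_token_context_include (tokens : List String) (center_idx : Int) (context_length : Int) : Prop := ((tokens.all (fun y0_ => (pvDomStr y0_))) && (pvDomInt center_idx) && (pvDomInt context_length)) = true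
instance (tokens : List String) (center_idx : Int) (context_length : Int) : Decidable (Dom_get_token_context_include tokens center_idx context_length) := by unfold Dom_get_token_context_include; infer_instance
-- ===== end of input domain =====

-- B replaces A's two incremental walk-append-count-break loops (plus a reverse) by
-- building the non-punctuation index list on each side once and slicing (objective: simpler).

-- ===== PORT A =====

-- exact on the stated ASCII domain: the printable ASCII characters of Unicode category P*
-- (tab/newline/CR are category Cc, not P)
def char_is_punctuation (ch : Char) : Bool :=
  ['!', '"', '#', '%', '&', '\'', '(', ')', '*', ',', '-', '.', '/',
   ':', ';', '?', '@', '[', '\\', ']', '_', '{', '}'].contains ch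

def word_only_punctuation (text : String) : Bool :=
  !text.toList.isEmpty && text.toList.all char_is_punctuation

-- A's left while loop: walk down from center_idx, appending and counting relevant tokens
def pvLeftLoopA (tokens : List String) (context_length : Int) (i rel : Int)
    (acc : List String) : List String :=
  if h : 0 < i ∧ rel < context_length then
    match PySem.List.pyGet? tokens (i - 1) with
    | none => acc   -- IndexError in Python; Pre_ excludes reaching this
    | some t =>
        pvLeftLoopA tokens context_length (i - 1)
          (rel + (if word_only_punctuation t then 0 else 1)) (acc ++ [t])
  else acc
termination_by i.toNat
decreasing_by omega

-- A's right while loop: walk up from center_idx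
def pvRightLoopA (tokens : List String) (context_length : Int) (i rel : Int)
    (acc : List String) : List String :=
  if h : i < (tokens.length : Int) - 1 ∧ rel < context_length then
    match PySem.List.pyGet? tokens (i + 1) with
    | none => acc   -- IndexError in Python; Pre_ excludes reaching this
    | some t =>
        pvRightLoopA tokens context_length (i + 1)
          (rel + (if word_only_punctuation t then 0 else 1)) (acc ++ [t])
  else acc
termination_by ((tokens.length : Int) - i).toNat
decreasing_by omega

def get_token_context_include (tokens : List String) (center_idx : Int)
    (context_length : Int) : List String :=
  let left_tokens := pvLeftLoopA tokens context_length center_idx 0 []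
  -- Python: 'if left_tokens: left_tokens.reverse()'
  let left_tokens := if left_tokens.isEmpty then left_tokens else left_tokens.reverse
  let right_tokens := pvRightLoopA tokens context_length center_idx 0 []
  match PySem.List.pyGet? tokens center_idx with
  | none => []   -- IndexError in Python: tokens[center_idx]; excluded by Pre_
  | some c => left_tokens ++ [c] ++ right_tokens

-- ===== PORT B =====
def get_token_context_include_alt (tokens : List String) (center_idx : Int)
    (context_length : Int) : List String :=
  -- inside Pre_ every pyGet? below is in range; .getD supplies an unreachable default
  let left_rel := (PySem.List.pyRange 0 center_idx 1).filter
    (fun i => !word_only_punctuation ((PySem.List.pyGet? tokens i).getD ""))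
  let right_rel := (PySem.List.pyRange (center_idx + 1) (tokens.length : Int) 1).filter
    (fun i => !word_only_punctuation ((PySem.List.pyGet? tokens i).getD ""))
  let start : Int :=
    if context_length ≤ 0 then center_idx
    else if context_length ≤ (left_rel.length : Int) then
      (PySem.List.pyGet? left_rel ((left_rel.length : Int) - context_length)).getD 0
    else 0
  let stop : Int :=
    if context_length ≤ 0 then center_idx + 1
    else if context_length ≤ (right_rel.length : Int) then
      (PySem.List.pyGet? right_rel (context_length - 1)).getD 0 + 1
    else (tokens.length : Int)
  PySem.List.slice tokens (some start) (some center_idx)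
    ++ [(PySem.List.pyGet? tokens center_idx).getD ""]
    ++ PySem.List.slice tokens (some (center_idx + 1)) (some stop)

-- ===== PRECONDITION & SPEC =====
-- Pre_ is the natural domain 0 ≤ center_idx < len(tokens): outside it Python A either raises
-- IndexError (center_idx ≥ len, or center_idx < -len) or returns an accidental mix produced by
-- negative-index wraparound, a corner neither program's value is specified on.
def Pre_get_token_context_include (tokens : List String) (center_idx : Int) (context_length : Int) : Prop :=
  0 ≤ center_idx ∧ center_idx < (tokens.length : Int)
instance (tokens : List String) (center_idx : Int) (context_length : Int) : Decidable (Pre_get_token_context_include tokens center_idx context_length) := by unfold Pre_get_token_context_include; infer_instance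

def pvWitness_get_token_context_include : List String × Int × Int := (["a", ".", "b", "!", "c"], 2, 2)

def Spec_get_token_context_include (tokens : List String) (center_idx : Int) (context_length : Int) (out : List String) : Prop := out = get_token_context_include_alt tokens center_idx context_length
instance (tokens : List String) (center_idx : Int) (context_length : Int) (out : List String) : Decidable (Spec_get_token_context_include tokens center_idx context_length out) := by unfold Spec_get_token_context_include; infer_instance

-- ===== CLAIM (what is proved, stated in full; the proofs are below) =====
def Claim_equal_get_token_context_include : Prop := ∀ (tokens : List String) (center_idx : Int) (context_length : Int), Dom_get_token_context_include tokens center_idx context_length → Pre_get_token_context_include tokens center_idx context_length → Spec_get_token_context_include tokens center_idx context_length (get_token_context_include tokens center_idx context_length)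


-- ===== LEMMAS AND PROOFS =====

-- is token i relevant (not punctuation-only)?
def pvRelv (tokens : List String) (i : Nat) : Bool := !word_only_punctuation (tokens.getD i "")

-- the list A's left loop appends (walking down from index i), as structural recursion
def pvLWalk (tokens : List String) (ctx : Int) : Int → Nat → List String
  | _, 0 => []
  | rel, i+1 =>
      if rel < ctx then
        tokens.getD i "" ::
          pvLWalk tokens ctx (rel + if word_only_punctuation (tokens.getD i "") then 0 else 1) i
      else []

-- the index at which A's left walk stops
def pvLStart (tokens : List String) (ctx : Int) : Int → Nat → Nat
  | _, 0 => 0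
  | rel, i+1 =>
      if rel < ctx then
        pvLStart tokens ctx (rel + if word_only_punctuation (tokens.getD i "") then 0 else 1) i
      else i+1

-- B's start boundary, computed from a relevant-index list
def pvBStart (R : List Nat) (need : Int) (i : Nat) : Nat :=
  if need ≤ 0 then i
  else if need ≤ (R.length : Int) then R.getD (R.length - need.toNat) 0
  else 0

-- A's right walk and its stop index
def pvRWalk (tokens : List String) (ctx : Int) (rel : Int) (i : Nat) : List String :=
  if h : i + 1 < tokens.length ∧ rel < ctx then
    tokens.getD (i+1) "" ::
      pvRWalk tokens ctx (rel + if word_only_punctuation (tokens.getD (i+1) "") then 0 else 1) (i+1)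
  else []
termination_by tokens.length - i
decreasing_by omega

def pvREnd (tokens : List String) (ctx : Int) (rel : Int) (i : Nat) : Nat :=
  if h : i + 1 < tokens.length ∧ rel < ctx then
    pvREnd tokens ctx (rel + if word_only_punctuation (tokens.getD (i+1) "") then 0 else 1) (i+1)
  else i+1
termination_by tokens.length - i
decreasing_by omega

-- B's end boundary, computed from a relevant-index list
def pvBEnd (R : List Nat) (need : Int) (i len : Nat) : Nat :=
  if need ≤ 0 then i+1
  else if need ≤ (R.length : Int) then R.getD (need.toNat - 1) 0 + 1
  else len

theorem pvLeftLoopA_spec (tokens : List String) (ctx : Int) (iN : Nat) (hle : iN ≤ tokens.length) :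
    ∀ rel acc, pvLeftLoopA tokens ctx (iN : Int) rel acc = acc ++ pvLWalk tokens ctx rel iN := by
  induction iN with
  | zero => intro rel acc; rw [pvLeftLoopA]; simp [pvLWalk]
  | succ i ih =>
    intro rel acc
    rw [pvLeftLoopA]
    by_cases hrel : rel < ctx
    · have hcond : 0 < ((i+1 : Nat) : Int) ∧ rel < ctx := by constructor <;> omega
      rw [dif_pos hcond]
      have hidx : ((i+1 : Nat) : Int) - 1 = (i : Nat) := by push_cast; ring
      have hget : PySem.List.pyGet? tokens (((i+1 : Nat) : Int) - 1) = some (tokens.getD i "") := by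
        rw [hidx, PySem.List.pyGet?_natCast]
        have : i < tokens.length := by omega
        simp [List.getD, List.getElem?_eq_getElem this]
      rw [hget, hidx]
      simp only [Option.some.injEq]
      rw [ih (by omega)]
      simp [pvLWalk, hrel, hidx]
    · have hcond : ¬ (0 < ((i+1 : Nat) : Int) ∧ rel < ctx) := by tauto
      rw [dif_neg hcond]
      simp [pvLWalk, hrel]

theorem pvLStart_le (tokens : List String) (ctx : Int) (iN : Nat) :
    ∀ rel, pvLStart tokens ctx rel iN ≤ iN := by
  induction iN with
  | zero => intro rel; simp [pvLStart]
  | succ i ih =>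
    intro rel
    rw [pvLStart]
    split
    · exact le_trans (ih _) (by omega)
    · omega

theorem pvLWalk_reverse (tokens : List String) (ctx : Int) (iN : Nat) (hle : iN ≤ tokens.length) :
    ∀ rel, (pvLWalk tokens ctx rel iN).reverse
      = (tokens.take iN).drop (pvLStart tokens ctx rel iN) := by
  induction iN with
  | zero => intro rel; simp [pvLWalk, pvLStart]
  | succ i ih =>
    intro rel
    have hi : i < tokens.length := by omega
    rw [pvLWalk, pvLStart]
    by_cases hrel : rel < ctx
    · rw [if_pos hrel, if_pos hrel]
      have hs := pvLStart_le tokens ctx i (rel + if word_only_punctuation (tokens.getD i "") then 0 else 1)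
      rw [List.reverse_cons, ih (by omega)]
      rw [List.take_succ, List.getElem?_eq_getElem hi]
      have hd : tokens.getD i "" = tokens[i] := by simp [List.getD, List.getElem?_eq_getElem hi]
      rw [List.drop_append_of_le_length (by simp only [List.length_take]; omega)]
      simp [List.getElem?_eq_getElem hi]
    · rw [if_neg hrel, if_neg hrel]
      have : (tokens.take (i+1)).length = i + 1 := by simp; omega
      rw [List.drop_eq_nil_of_le (by omega), List.reverse_nil]

theorem pvLStart_eq (tokens : List String) (ctx : Int) (iN : Nat) :
    ∀ rel, pvLStart tokens ctx rel iN
      = pvBStart ((List.range iN).filter (pvRelv tokens)) (ctx - rel) iN := by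
  induction iN with
  | zero => intro rel; simp [pvLStart, pvBStart]
  | succ i ih =>
    intro rel
    rw [pvLStart, List.range_succ, List.filter_append]
    by_cases hrel : rel < ctx
    · rw [if_pos hrel, ih]
      by_cases hw : word_only_punctuation (tokens.getD i "")
      · have hC : List.filter (pvRelv tokens) [i] = [] := by
          simp only [List.filter_singleton, pvRelv, List.getD_eq_getElem?_getD] at *
          simp [hw]
        rw [if_pos hw, hC, List.append_nil]
        unfold pvBStart
        rw [if_neg (by omega : ¬ (ctx - (rel + 0) ≤ 0)), if_neg (by omega : ¬ (ctx - rel ≤ 0)),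
          (by omega : ctx - (rel + 0) = ctx - rel)]
      · have hC : List.filter (pvRelv tokens) [i] = [i] := by
          simp only [List.filter_singleton, pvRelv, List.getD_eq_getElem?_getD] at *
          simp [hw]
        rw [if_neg hw, hC]
        set F := (List.range i).filter (pvRelv tokens) with hF
        unfold pvBStart
        rw [if_neg (by omega : ¬ (ctx - rel ≤ 0))]
        by_cases h1 : ctx - rel = 1
        · rw [if_pos (by omega : ctx - (rel + 1) ≤ 0)]
          rw [if_pos (by simp; omega : ctx - rel ≤ ((F ++ [i]).length : Int))]
          have h1' : (ctx - rel).toNat = 1 := by omega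
          rw [h1']
          simp [List.getD, List.getElem?_concat_length]
        · have h2 : 2 ≤ ctx - rel := by omega
          rw [if_neg (by omega : ¬ (ctx - (rel + 1) ≤ 0))]
          by_cases h3 : ctx - rel ≤ ((F ++ [i]).length : Int)
          · have h3' : ctx - (rel + 1) ≤ (F.length : Int) := by simp at h3 ⊢; omega
            rw [if_pos h3, if_pos h3']
            have hidx : (F ++ [i]).length - (ctx - rel).toNat = F.length - (ctx - (rel+1)).toNat := by
              simp; omega
            rw [hidx]
            have hlt : F.length - (ctx - (rel+1)).toNat < F.length := by
              simp at h3; omega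
            simp [List.getD, List.getElem?_eq_getElem hlt, List.getElem_append_left, hlt]
          · have h3' : ¬ (ctx - (rel + 1) ≤ (F.length : Int)) := by simp at h3 ⊢; omega
            rw [if_neg h3, if_neg h3']
    · rw [if_neg hrel]
      unfold pvBStart
      rw [if_pos (by omega : ctx - rel ≤ 0)]

theorem pvRightLoopA_spec_aux (tokens : List String) (ctx : Int) :
    ∀ (k iN : Nat), tokens.length - iN ≤ k →
    ∀ rel acc, pvRightLoopA tokens ctx (iN : Int) rel acc = acc ++ pvRWalk tokens ctx rel iN := by
  intro k
  induction k with
  | zero =>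
    intro iN hk rel acc
    rw [pvRightLoopA, pvRWalk]
    rw [dif_neg (by push_cast; omega), dif_neg (by omega)]
    simp
  | succ k ih =>
    intro iN hk rel acc
    rw [pvRightLoopA, pvRWalk]
    by_cases hc : iN + 1 < tokens.length ∧ rel < ctx
    · rw [dif_pos (by push_cast; omega : (iN : Int) < (tokens.length : Int) - 1 ∧ rel < ctx),
        dif_pos hc]
      have hget : PySem.List.pyGet? tokens ((iN : Int) + 1) = some (tokens.getD (iN+1) "") := by
        rw [(by push_cast; ring : (iN : Int) + 1 = ((iN+1 : Nat) : Int)), PySem.List.pyGet?_natCast]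
        simp [List.getD, List.getElem?_eq_getElem hc.1]
      rw [hget]
      simp only [Option.some.injEq]
      rw [(by push_cast; ring : (iN : Int) + 1 = ((iN+1 : Nat) : Int)), ih (iN+1) (by omega)]
      simp
    · rw [dif_neg (by push_cast; omega), dif_neg hc]
      simp

theorem pvREnd_bounds (tokens : List String) (ctx : Int) (rel : Int) (iN : Nat) :
    iN + 1 ≤ pvREnd tokens ctx rel iN ∧
      (iN < tokens.length → pvREnd tokens ctx rel iN ≤ tokens.length) := by
  induction rel, iN using pvREnd.induct tokens ctx with
  | case1 rel i h ih =>
    simp only [dite_eq_ite] at ih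
    rw [pvREnd, dif_pos h]
    exact ⟨by omega, fun _ => ih.2 (by omega)⟩
  | case2 rel i h =>
    rw [pvREnd, dif_neg h]
    exact ⟨le_refl _, fun hi => by omega⟩

theorem pvRWalk_eq (tokens : List String) (ctx : Int) (rel : Int) (iN : Nat) :
    pvRWalk tokens ctx rel iN
      = (tokens.drop (iN+1)).take (pvREnd tokens ctx rel iN - (iN+1)) := by
  induction rel, iN using pvREnd.induct tokens ctx with
  | case1 rel i h ih =>
    simp only [dite_eq_ite] at ih
    rw [pvRWalk, pvREnd, dif_pos h, dif_pos h, ih]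
    have h1 : i + 1 < tokens.length := h.1
    rw [List.drop_eq_getElem_cons h1]
    have hb := (pvREnd_bounds tokens ctx (rel + if word_only_punctuation (tokens.getD (i+1) "") then 0 else 1) (i+1)).1
    rw [(by omega : pvREnd tokens ctx (rel + if word_only_punctuation (tokens.getD (i+1) "") then 0 else 1) (i+1) - (i+1)
        = (pvREnd tokens ctx (rel + if word_only_punctuation (tokens.getD (i+1) "") then 0 else 1) (i+1) - (i+1+1)) + 1)]
    rw [List.take_succ_cons]
    simp [List.getD, List.getElem?_eq_getElem h1]
  | case2 rel i h =>
    rw [pvRWalk, pvREnd, dif_neg h, dif_neg h]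
    simp

theorem pvREnd_eq (tokens : List String) (ctx : Int) (rel : Int) (iN : Nat) (hi : iN < tokens.length) :
    pvREnd tokens ctx rel iN
      = pvBEnd ((List.range' (iN+1) (tokens.length - (iN+1))).filter (pvRelv tokens))
          (ctx - rel) iN tokens.length := by
  induction rel, iN using pvREnd.induct tokens ctx with
  | case1 rel i h ih =>
    simp only [dite_eq_ite] at ih
    rw [pvREnd, dif_pos h]
    have hlen : tokens.length - (i+1) = (tokens.length - (i+2)) + 1 := by omega
    rw [hlen, List.range'_succ, List.filter_cons]
    rw [ih h.1]
    set S := (List.range' (i+1+1) (tokens.length - (i+2))).filter (pvRelv tokens) with hS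
    by_cases hw : word_only_punctuation (tokens.getD (i+1) "")
    · have hrelv : pvRelv tokens (i+1) = false := by
        simp only [pvRelv, List.getD_eq_getElem?_getD] at *
        simp [hw]
      rw [if_pos hw, hrelv]
      simp only [Bool.false_eq_true, if_false]
      unfold pvBEnd
      rw [if_neg (by omega : ¬ (ctx - (rel + 0) ≤ 0)), if_neg (by omega : ¬ (ctx - rel ≤ 0)),
        (by omega : ctx - (rel + 0) = ctx - rel)]
    · have hrelv : pvRelv tokens (i+1) = true := by
        simp only [pvRelv, List.getD_eq_getElem?_getD] at *
        simp [hw]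
      rw [if_neg hw, hrelv]
      simp only [if_true]
      unfold pvBEnd
      rw [if_neg (by omega : ¬ (ctx - rel ≤ 0))]
      by_cases h1 : ctx - rel = 1
      · rw [if_pos (by omega : ctx - (rel + 1) ≤ 0)]
        rw [if_pos (by simp; omega : ctx - rel ≤ (((i+1) :: S).length : Int))]
        have h1' : (ctx - rel).toNat = 1 := by omega
        rw [h1']
        simp
      · have h2 : 2 ≤ ctx - rel := by omega
        rw [if_neg (by omega : ¬ (ctx - (rel + 1) ≤ 0))]
        by_cases h3 : ctx - rel ≤ (((i+1) :: S).length : Int)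
        · have h3' : ctx - (rel + 1) ≤ (S.length : Int) := by simp at h3 ⊢; omega
          rw [if_pos h3, if_pos h3']
          have hidx : (ctx - rel).toNat - 1 = ((ctx - (rel+1)).toNat - 1) + 1 := by omega
          rw [hidx]
          simp [List.getD]
        · have h3' : ¬ (ctx - (rel + 1) ≤ (S.length : Int)) := by simp at h3 ⊢; omega
          rw [if_neg h3, if_neg h3']
  | case2 rel i h =>
    rw [pvREnd, dif_neg h]
    unfold pvBEnd
    by_cases hneed : ctx - rel ≤ 0
    · rw [if_pos hneed]
    · have hlen : i + 1 = tokens.length := by omega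
      have hF : (List.range' (i+1) (tokens.length - (i+1))).filter (pvRelv tokens) = [] := by
        rw [(by omega : tokens.length - (i+1) = 0)]
        simp
      rw [hF, if_neg hneed, if_neg (by simp; omega)]
      omega

theorem pvLeftRel_eq (tokens : List String) (n : Nat) :
    (PySem.List.pyRange 0 (n : Int) 1).filter
        (fun i => !word_only_punctuation ((PySem.List.pyGet? tokens i).getD ""))
      = ((List.range n).filter (pvRelv tokens)).map (fun k : Nat => (k : Int)) := by
  rw [PySem.List.pyRange_one, List.filter_map]
  simp only [Int.sub_zero, Int.toNat_natCast, zero_add]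
  refine congrArg (List.map _) (List.filter_congr ?_)
  intro k hk
  simp [Function.comp, PySem.List.pyGet?_natCast, pvRelv, List.getD_eq_getElem?_getD]

theorem pvRightRel_eq (tokens : List String) (n : Nat) :
    (PySem.List.pyRange ((n : Int) + 1) (tokens.length : Int) 1).filter
        (fun i => !word_only_punctuation ((PySem.List.pyGet? tokens i).getD ""))
      = ((List.range' (n+1) (tokens.length - (n+1))).filter (pvRelv tokens)).map
          (fun k : Nat => (k : Int)) := by
  rw [PySem.List.pyRange_one, List.filter_map, List.range'_eq_map_range, List.filter_map]
  rw [List.map_map]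
  have hn : ((tokens.length : Int) - ((n : Int) + 1)).toNat = tokens.length - (n+1) := by omega
  rw [hn]
  have hfun : ((fun k : Nat => (k : Int)) ∘ (fun x => (n+1) + x)) = fun k : Nat => (n : Int) + 1 + (k : Int) := by
    funext k; simp only [Function.comp_apply]; push_cast; ring
  rw [hfun]
  refine congrArg (List.map _) (List.filter_congr ?_)
  intro k hk
  have hcast : (n : Int) + 1 + (k : Int) = (((n+1) + k : Nat) : Int) := by push_cast; ring
  simp only [Function.comp_apply, hcast, PySem.List.pyGet?_natCast, pvRelv,
    List.getD_eq_getElem?_getD]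

theorem pv_main (tokens : List String) (center_idx context_length : Int)
    (h0 : 0 ≤ center_idx) (h1 : center_idx < (tokens.length : Int)) :
    get_token_context_include tokens center_idx context_length
      = get_token_context_include_alt tokens center_idx context_length := by
  obtain ⟨n, rfl⟩ : ∃ n : Nat, center_idx = (n : Int) := ⟨center_idx.toNat, by omega⟩
  have hn : n < tokens.length := by omega
  set ctx := context_length with hctx
  have hmid : PySem.List.pyGet? tokens (n : Int) = some (tokens[n]'hn) := by
    rw [PySem.List.pyGet?_natCast, List.getElem?_eq_getElem hn]
  set F := (List.range n).filter (pvRelv tokens) with hF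
  set S := (List.range' (n+1) (tokens.length - (n+1))).filter (pvRelv tokens) with hS
  -- A's side
  have hA : get_token_context_include tokens (n : Int) ctx
      = ((tokens.take n).drop (pvBStart F ctx n)
          ++ [tokens[n]'hn])
          ++ (tokens.drop (n+1)).take (pvBEnd S ctx n tokens.length - (n+1)) := by
    unfold get_token_context_include
    rw [hmid]
    simp only []
    rw [pvLeftLoopA_spec tokens ctx n (by omega), List.nil_append]
    rw [pvRightLoopA_spec_aux tokens ctx tokens.length n (by omega), List.nil_append]
    have hrev : ∀ (L : List String), (if L.isEmpty then L else L.reverse) = L.reverse := by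
      intro L; cases L <;> simp
    rw [hrev, pvLWalk_reverse tokens ctx n (by omega), pvRWalk_eq]
    rw [pvLStart_eq tokens ctx n, pvREnd_eq tokens ctx 0 n hn]
    rw [(by omega : ctx - 0 = ctx)]
  rw [hA]
  -- B's side
  unfold get_token_context_include_alt
  simp only []
  rw [pvLeftRel_eq tokens n, pvRightRel_eq tokens n, hmid]
  rw [← hF, ← hS]
  have hstart : (if ctx ≤ 0 then (n : Int)
      else if ctx ≤ ((F.map (fun k : Nat => (k : Int))).length : Int) then
        (PySem.List.pyGet? (F.map (fun k : Nat => (k : Int)))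
          (((F.map (fun k : Nat => (k : Int))).length : Int) - ctx)).getD 0
      else 0) = ((pvBStart F ctx n : Nat) : Int) := by
    unfold pvBStart
    by_cases hc0 : ctx ≤ 0
    · rw [if_pos hc0, if_pos hc0]
    · rw [if_neg hc0, if_neg hc0]
      by_cases hcl : ctx ≤ (F.length : Int)
      · rw [if_pos (by simpa using hcl), if_pos hcl]
        have hj : ((F.map (fun k : Nat => (k : Int))).length : Int) - ctx
            = ((F.length - ctx.toNat : Nat) : Int) := by simp; omega
        have hjlt : F.length - ctx.toNat < F.length := by omega
        rw [hj, PySem.List.pyGet?_natCast, List.getElem?_map,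
          List.getElem?_eq_getElem hjlt]
        simp [List.getD, List.getElem?_eq_getElem hjlt]
      · rw [if_neg (by simpa using hcl), if_neg hcl]
        rfl
  have hstop : (if ctx ≤ 0 then (n : Int) + 1
      else if ctx ≤ ((S.map (fun k : Nat => (k : Int))).length : Int) then
        (PySem.List.pyGet? (S.map (fun k : Nat => (k : Int))) (ctx - 1)).getD 0 + 1
      else (tokens.length : Int)) = ((pvBEnd S ctx n tokens.length : Nat) : Int) := by
    unfold pvBEnd
    by_cases hc0 : ctx ≤ 0
    · rw [if_pos hc0, if_pos hc0]; push_cast; ring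
    · rw [if_neg hc0, if_neg hc0]
      by_cases hcl : ctx ≤ (S.length : Int)
      · rw [if_pos (by simpa using hcl), if_pos hcl]
        have hj : ctx - 1 = ((ctx.toNat - 1 : Nat) : Int) := by omega
        have hjlt : ctx.toNat - 1 < S.length := by omega
        rw [hj, PySem.List.pyGet?_natCast, List.getElem?_map,
          List.getElem?_eq_getElem hjlt]
        simp [List.getD, List.getElem?_eq_getElem hjlt]
      · rw [if_neg (by simpa using hcl), if_neg hcl]
  rw [hstart, hstop]
  rw [PySem.List.slice_natCast]
  rw [(by push_cast; ring : (n : Int) + 1 = ((n+1 : Nat) : Int)), PySem.List.slice_natCast]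
  rw [List.drop_take]
  simp

-- ===== VERDICT (by name: the statement is the Claim_ definition above) =====
theorem get_token_context_include_spec : Claim_equal_get_token_context_include := by
  intro tokens center_idx context_length _hdom hpre
  unfold Spec_get_token_context_include
  exact pv_main tokens center_idx context_length hpre.1 hpre.2
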